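-- pv_equiv track=rewrite | github.com/worldemar/investment-portfolio-optimizer | modules/pipeline.py | all_possible_allocations
-- ===== SOURCE A (Python) =====
-- def all_possible_allocations(assets_num: int, step: int):
--     def _allocations_recursive(
--             assets_num: list, step: int,
--             asset_idx: int = 0, asset_idx_max: int = 0,
--             allocation: list[int] = (),
--             allocation_sum: int = 0):
--         if asset_idx == asset_idx_max:
--             allocation[asset_idx] = 100 - allocation_sum
--             yield allocation.copy() # dict(zip(assets, allocation))
--             allocation[asset_idx] = 0
--         else:
--             for next_asset_percent in range(0, 100 - allocation_sum + 1, step):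
--                 allocation[asset_idx] = next_asset_percent
--                 yield from _allocations_recursive(
--                     assets_num, step,
--                     asset_idx + 1, asset_idx_max,
--                     allocation,
--                     allocation_sum + next_asset_percent)
--                 allocation[asset_idx] = 0
--     if 100 % step != 0:
--         raise ValueError(f'cannot use step={step}, must be a divisor of 100')
--     yield from _allocations_recursive(
--         assets_num = assets_num, step = step,
--         asset_idx = 0, asset_idx_max = assets_num - 1,
--         allocation = [0] * assets_num,
--         allocation_sum = 0)
-- ===== SOURCE B (Python) =====
-- def all_possible_allocations(assets_num: int, step: int):
--     if 100 % step != 0: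
--         raise ValueError(f'cannot use step={step}, must be a divisor of 100')
--     # breadth-first: grow all prefixes level by level, then close each with the remainder
--     prefixes = [([], 0)]
--     for _ in range(assets_num - 1):
--         prefixes = [(p + [v], s + v)
--                     for (p, s) in prefixes
--                     for v in range(0, 100 - s + 1, step)]
--     for p, s in prefixes:
--         yield p + [100 - s]
-- ===== Notes on version B (the rewrite author's own statement) =====
-- stated objective: alternative
-- what changed: Replaces the depth-first recursive generator that mutates a single shared allocation buffer by a level-by-level (breadth-first) iterative construction: a list of (prefix, sum) pairs is extended once per asset, and the last asset is filled in with 100 - sum at the end.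
-- outside the precondition, e.g. on all_possible_allocations(0, -5): A returns [], B returns [[100]]; on all_possible_allocations(0, 5): A raises IndexError, B returns [[100]]
import Mathlib
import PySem

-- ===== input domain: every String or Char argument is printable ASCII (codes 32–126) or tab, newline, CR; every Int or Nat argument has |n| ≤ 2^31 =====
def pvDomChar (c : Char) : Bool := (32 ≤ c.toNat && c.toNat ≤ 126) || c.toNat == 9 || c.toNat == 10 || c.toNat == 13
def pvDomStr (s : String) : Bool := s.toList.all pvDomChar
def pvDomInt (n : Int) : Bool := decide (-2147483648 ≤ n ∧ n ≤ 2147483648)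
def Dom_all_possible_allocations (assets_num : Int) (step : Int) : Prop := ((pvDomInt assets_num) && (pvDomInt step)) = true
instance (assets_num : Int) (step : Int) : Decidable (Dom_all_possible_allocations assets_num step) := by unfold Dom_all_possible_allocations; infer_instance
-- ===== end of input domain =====

-- B replaces A's depth-first recursive generator over one mutated buffer by an
-- iterative level-by-level construction of (prefix, sum) pairs; equivalence is
-- about the list of yielded values (A mutates only its own local buffer).

-- ===== PORT A =====
-- _allocations_recursive: the mutable `allocation` buffer is threaded through as
-- state (second component); `fuel = asset_idx_max - asset_idx` makes the
-- recursion structural (fuel 0 with asset_idx ≠ asset_idx_max is unreachable on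
-- inputs admitted by Pre_).
def pvARec (step : Int) (asset_idx : Int) (asset_idx_max : Int)
    (allocation : List Int) (allocation_sum : Int) (fuel : Nat) :
    List (List Int) × List Int :=
  if asset_idx = asset_idx_max then
    let a1 := allocation.set asset_idx.toNat (100 - allocation_sum)
    ([a1], a1.set asset_idx.toNat 0)
  else
    match fuel with
    | 0 => ([], allocation)
    | Nat.succ f =>
      (PySem.List.pyRange 0 (100 - allocation_sum + 1) step).foldl
        (fun acc next_asset_percent =>
          let alloc1 := acc.2.set asset_idx.toNat next_asset_percent
          let r := pvARec step (asset_idx + 1) asset_idx_max alloc1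
                     (allocation_sum + next_asset_percent) f
          (acc.1 ++ r.1, r.2.set asset_idx.toNat 0))
        ([], allocation)

def all_possible_allocations (assets_num : Int) (step : Int) : List (List Int) :=
  if PySem.Int.mod 100 step ≠ 0 then []  -- ValueError; excluded by Pre_
  else (pvARec step 0 (assets_num - 1) (List.replicate assets_num.toNat 0) 0
          (assets_num - 1).toNat).1

-- ===== PORT B =====
def all_possible_allocations_alt (assets_num : Int) (step : Int) : List (List Int) :=
  if PySem.Int.mod 100 step ≠ 0 then []  -- ValueError; excluded by Pre_
  else
    let prefixes := (List.range (assets_num - 1).toNat).foldl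
      (fun prefixes _ => prefixes.flatMap (fun ps =>
        (PySem.List.pyRange 0 (100 - ps.2 + 1) step).map
          (fun v => (ps.1 ++ [v], ps.2 + v))))
      [(([] : List Int), (0 : Int))]
    prefixes.map (fun ps => ps.1 ++ [100 - ps.2])

-- ===== PRECONDITION & SPEC =====
-- Pre_ excludes step = 0 (A raises ZeroDivisionError), steps not dividing 100
-- (A raises ValueError), and non-positive assets_num, which is outside the
-- natural domain: there A raises IndexError for positive step and yields
-- nothing only because a negative step empties the loop over an empty buffer.
def Pre_all_possible_allocations (assets_num : Int) (step : Int) : Prop :=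
  1 ≤ assets_num ∧ step ≠ 0 ∧ PySem.Int.mod 100 step = 0
instance (assets_num : Int) (step : Int) : Decidable (Pre_all_possible_allocations assets_num step) := by
  unfold Pre_all_possible_allocations; infer_instance

def pvWitness_all_possible_allocations : Int × Int := (3, 25)

def Spec_all_possible_allocations (assets_num : Int) (step : Int) (out : List (List Int)) : Prop :=
  out = all_possible_allocations_alt assets_num step
instance (assets_num : Int) (step : Int) (out : List (List Int)) : Decidable (Spec_all_possible_allocations assets_num step out) := by
  unfold Spec_all_possible_allocations; infer_instance

-- ===== CLAIM (what is proved, stated in full; the proofs are below) =====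
def Claim_equal_all_possible_allocations : Prop := ∀ (assets_num : Int) (step : Int), Dom_all_possible_allocations assets_num step → Pre_all_possible_allocations assets_num step → Spec_all_possible_allocations assets_num step (all_possible_allocations assets_num step)

-- ===== LEMMAS AND PROOFS =====

-- pure description of the enumeration: all suffixes of length fuel+1 whose
-- entries sum (with the already-placed sum s) to 100
def pvGen (step : Int) : Nat → Int → List (List Int)
  | 0, s => [[100 - s]]
  | Nat.succ n, s =>
    (PySem.List.pyRange 0 (100 - s + 1) step).flatMap
      (fun v => (pvGen step n (s + v)).map (fun t => v :: t))

lemma pv_set_append (P : List Int) (x : Int) (t : List Int) (b : Int) :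
    (P ++ x :: t).set P.length b = P ++ b :: t := by
  induction P with
  | nil => rfl
  | cons a P ih => simp [ih]

lemma pvARec_eq (step : Int) :
    ∀ (fuel : Nat) (P : List Int) (s : Int),
      pvARec step (P.length : Int) ((P.length : Int) + fuel)
        (P ++ List.replicate (fuel + 1) 0) s fuel
      = ((pvGen step fuel s).map (fun t => P ++ t), P ++ List.replicate (fuel + 1) 0) := by
  intro fuel
  induction fuel with
  | zero =>
    intro P s
    rw [pvARec, if_pos (by simp)]
    simp only [Int.toNat_natCast, List.replicate, pv_set_append, pvGen, List.map]
  | succ n ih =>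
    intro P s
    have hne : (P.length : Int) ≠ (P.length : Int) + (n + 1 : Nat) := by
      push_cast; omega
    rw [pvARec, if_neg hne]
    have hfold : ∀ (vs : List Int) (acc : List (List Int)),
        vs.foldl
          (fun acc next_asset_percent =>
            let alloc1 := acc.2.set (P.length : Int).toNat next_asset_percent
            let r := pvARec step ((P.length : Int) + 1) ((P.length : Int) + (n + 1 : Nat))
                       alloc1 (s + next_asset_percent) n
            (acc.1 ++ r.1, r.2.set (P.length : Int).toNat 0))
          (acc, P ++ List.replicate (n + 2) 0)
        = (acc ++ vs.flatMap (fun v => (pvGen step n (s + v)).map (fun t => P ++ v :: t)),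
           P ++ List.replicate (n + 2) 0) := by
      intro vs
      induction vs with
      | nil => intro acc; simp
      | cons v vs ihv =>
        intro acc
        have hrep : List.replicate (n + 2) (0 : Int) = 0 :: List.replicate (n + 1) 0 := rfl
        have hset1 : (P ++ List.replicate (n + 2) 0).set (P.length : Int).toNat v
            = (P ++ [v]) ++ List.replicate (n + 1) 0 := by
          rw [hrep, Int.toNat_natCast, pv_set_append]; simp
        have hidx : (P.length : Int) + 1 = (((P ++ [v]).length : Nat) : Int) := by simp
        have hmax : (P.length : Int) + (n + 1 : Nat)
            = (((P ++ [v]).length : Nat) : Int) + (n : Nat) := by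
          simp; ring
        have happ :
            (let alloc1 := ((acc, P ++ List.replicate (n + 2) (0 : Int))).2.set
                (P.length : Int).toNat v
             let r := pvARec step ((P.length : Int) + 1) ((P.length : Int) + (n + 1 : Nat))
                 alloc1 (s + v) n
             (((acc, P ++ List.replicate (n + 2) (0 : Int))).1 ++ r.1,
               r.2.set (P.length : Int).toNat 0))
            = (acc ++ (pvGen step n (s + v)).map (fun t => P ++ v :: t),
               P ++ List.replicate (n + 2) 0) := by
          simp only [hset1, hidx, hmax]
          rw [ih (P ++ [v]) (s + v)]
          simp
          exact hrep.symm
        rw [List.foldl_cons, happ, ihv]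
        simp [List.append_assoc]
    rw [hfold]
    simp [pvGen, List.map_flatMap, List.map_map, Function.comp_def]

def pvStepFn (step : Int) (L : List (List Int × Int)) : List (List Int × Int) :=
  L.flatMap (fun ps =>
    (PySem.List.pyRange 0 (100 - ps.2 + 1) step).map (fun v => (ps.1 ++ [v], ps.2 + v)))

lemma pv_foldl_range_const (step : Int) :
    ∀ (k : Nat) (init : List (List Int × Int)),
      (List.range k).foldl
        (fun prefixes _ => prefixes.flatMap (fun ps =>
          (PySem.List.pyRange 0 (100 - ps.2 + 1) step).map
            (fun v => (ps.1 ++ [v], ps.2 + v)))) init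
      = (pvStepFn step)^[k] init := by
  intro k
  induction k with
  | zero => intro init; rfl
  | succ n ih =>
    intro init
    rw [List.range_succ, List.foldl_append, ih, List.foldl_cons, List.foldl_nil,
      Function.iterate_succ_apply']
    rfl

lemma pv_iter_eq (step : Int) :
    ∀ (k : Nat) (L : List (List Int × Int)),
      ((pvStepFn step)^[k] L).map (fun ps => ps.1 ++ [100 - ps.2])
      = L.flatMap (fun ps => (pvGen step k ps.2).map (fun t => ps.1 ++ t)) := by
  intro k
  induction k with
  | zero =>
    intro L
    simp only [Function.iterate_zero, id_eq, pvGen]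
    induction L with
    | nil => rfl
    | cons a L ihL => simp_all
  | succ n ih =>
    intro L
    rw [Function.iterate_succ_apply, ih, pvStepFn, List.flatMap_assoc]
    congr 1
    funext ps
    simp [pvGen, List.map_flatMap, List.flatMap_map, List.map_map, Function.comp_def,
      List.append_assoc]

-- ===== VERDICT (by name: the statement is the Claim_ definition above) =====
theorem all_possible_allocations_spec : Claim_equal_all_possible_allocations := by
  intro assets_num step _ hpre
  obtain ⟨hn, hs0, hmod⟩ := hpre
  unfold Spec_all_possible_allocations all_possible_allocations all_possible_allocations_alt
  rw [if_neg (by simp [hmod]), if_neg (by simp [hmod])]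
  set k := (assets_num - 1).toNat with hk
  have hkk : ((k : Nat) : Int) = assets_num - 1 := by
    rw [hk, Int.toNat_of_nonneg (by omega)]
  have hmax : assets_num - 1 = ((0 : Int)) + (k : Nat) := by omega
  have hrepl : List.replicate assets_num.toNat (0 : Int)
      = [] ++ List.replicate (k + 1) 0 := by
    simp only [List.nil_append]
    congr 1
    omega
  have hA := pvARec_eq step k ([] : List Int) 0
  simp only [List.length_nil, Nat.cast_zero] at hA
  rw [hmax, hrepl, hA, pv_foldl_range_const, pv_iter_eq]
  simp
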